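-- pv_equiv track=rewrite | github.com/oliviergf/advent-of-code-2019 | day4/day4.py | hasUnique
-- ===== SOURCE A (Python) =====
-- def hasUnique(consecutives):
--     uniques = {}
--     for i in consecutives:
--         if i not in uniques:
--             uniques[i] = 1
--         else:
--             uniques[i] += 1
--     hasSingle = False
--     for key in uniques:
--         if(uniques[key] == 1):
--             hasSingle = True
--     return hasSingle
-- ===== SOURCE B (Python) =====
-- def hasUnique(consecutives):
--     # sort, then scan consecutive runs: True iff some run has length exactly 1
--     s = sorted(consecutives)
--     while s:
--         x = s[0]
--         k = 1
--         while k < len(s) and s[k] == x: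
--             k += 1
--         if k == 1:
--             return True
--         s = s[k:]
--     return False
-- ===== Notes on version B (the rewrite author's own statement) =====
-- stated objective: alternative
-- what changed: Replaces the frequency-dict build plus key scan with sort-then-scan of consecutive equal runs, returning True as soon as a run of length 1 is found.
import Mathlib
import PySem

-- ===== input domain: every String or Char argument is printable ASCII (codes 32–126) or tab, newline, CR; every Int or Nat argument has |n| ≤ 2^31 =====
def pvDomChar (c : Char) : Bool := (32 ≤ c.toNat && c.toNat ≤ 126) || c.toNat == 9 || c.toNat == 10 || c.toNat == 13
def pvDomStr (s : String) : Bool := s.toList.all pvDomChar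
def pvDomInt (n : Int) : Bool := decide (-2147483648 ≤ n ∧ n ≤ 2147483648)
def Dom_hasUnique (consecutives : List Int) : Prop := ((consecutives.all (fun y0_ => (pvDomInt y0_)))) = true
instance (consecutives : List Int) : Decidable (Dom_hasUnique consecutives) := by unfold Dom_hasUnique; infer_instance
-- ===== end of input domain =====

-- B replaces A's frequency-dict build + key scan by sort-then-scan of consecutive equal runs (alternative algorithm, same results).


-- ===== PORT A =====
def hasUnique (consecutives : List Int) : Bool :=
  let uniques := consecutives.foldl (fun d i =>
    if !(d.contains i) then d.insert i 1 else d.insert i (d.getD i 0 + 1))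
    (PySem.Dict.empty : PySem.Dict Int Int)
  let hasSingle := uniques.keys.foldl (fun hs key =>
    if uniques.getD key 0 == 1 then true else hs) false
  hasSingle

-- ===== PORT B =====
-- the inner 'while' counting the run is the takeWhile length (k = 1 + its length); 's = s[k:]' is the dropWhile
def scanRuns : List Int → Bool
  | [] => false
  | x :: rest =>
    ((rest.takeWhile (fun y => y == x)).length == 0) || scanRuns (rest.dropWhile (fun y => y == x))
termination_by s => s.length
decreasing_by
  have := List.length_dropWhile_le (p := fun y => y == x) (l := rest)
  simp; omega

def hasUnique_alt (consecutives : List Int) : Bool :=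
  scanRuns (PySem.List.sorted consecutives (fun x => x) false)

-- ===== PRECONDITION & SPEC =====
def Spec_hasUnique (consecutives : List Int) (out : Bool) : Prop := out = hasUnique_alt consecutives
instance (consecutives : List Int) (out : Bool) : Decidable (Spec_hasUnique consecutives out) := by unfold Spec_hasUnique; infer_instance

-- ===== CLAIM (what is proved, stated in full; the proofs are below) =====
def Claim_equal_hasUnique : Prop := ∀ (consecutives : List Int), Dom_hasUnique consecutives → Spec_hasUnique consecutives (hasUnique consecutives)

-- ===== LEMMAS AND PROOFS =====

-- A's dict loop is Counter(xs) and the key scan is 'some key has count 1'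
theorem hasUnique_eq_any (xs : List Int) :
    hasUnique xs = (PySem.Set.ofList xs).any (fun k => xs.count k == 1) := by
  have h1 : xs.foldl (fun d i =>
      if !(d.contains i) then d.insert i 1 else d.insert i (d.getD i 0 + 1))
      (PySem.Dict.empty : PySem.Dict Int Int) = PySem.Dict.counter xs := by
    rw [PySem.List.foldl_congr_mem xs _
      (fun (d : PySem.Dict Int Int) i => d.insert i (d.getD i 0 + 1)) _
      (by intro d i _
          by_cases hc : d.contains i = true
          · simp [hc]
          · simp only [Bool.not_eq_true] at hc
            rw [if_pos (by simp [hc])]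
            show d.insert i 1 = d.insert i (d.getD i 0 + 1)
            rw [PySem.Dict.getD_of_not_contains d 0 hc]
            norm_num)]
    exact PySem.Dict.foldl_insert_getD_add_one_eq_counter xs
  simp only [hasUnique, h1, PySem.Dict.keys_counter]
  rw [PySem.List.foldl_if_true_eq]
  simp only [Bool.false_or]
  apply PySem.List.any_congr_mem
  intro k hk
  rw [PySem.Dict.getD_counter]
  simp [Nat.cast_eq_one]

-- x never survives into the dropWhile tail of a nondecreasing list
theorem not_mem_dropWhile_beq (x : Int) (l : List Int)
    (hx : ∀ y ∈ l, x ≤ y) (hpw : l.Pairwise (· ≤ ·)) :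
    x ∉ l.dropWhile (fun y => y == x) := by
  induction l with
  | nil => simp
  | cons a t ih =>
    by_cases ha : (a == x) = true
    · simp only [List.dropWhile_cons]
      rw [if_pos ha]
      exact ih (fun y hy => hx y (List.mem_cons_of_mem a hy)) (List.pairwise_cons.mp hpw).2
    · simp only [List.dropWhile_cons]
      rw [if_neg ha]
      intro hmem
      have hne : a ≠ x := by simpa using ha
      rcases List.mem_cons.mp hmem with h1 | h1
      · exact hne h1.symm
      · have hle1 : a ≤ x := (List.pairwise_cons.mp hpw).1 x h1
        have hle2 : x ≤ a := hx a List.mem_cons_self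
        exact hne (le_antisymm hle1 hle2)

-- for a sorted list, the run scan is 'some element has count 1'
theorem scanRuns_sorted (s : List Int) (h : s.Pairwise (· ≤ ·)) :
    scanRuns s = s.any (fun k => s.count k == 1) := by
  match s with
  | [] => simp [scanRuns]
  | x :: rest =>
    have hx : ∀ y ∈ rest, x ≤ y := (List.pairwise_cons.mp h).1
    have hrest : rest.Pairwise (· ≤ ·) := (List.pairwise_cons.mp h).2
    have htailpw : (rest.dropWhile (fun y => y == x)).Pairwise (· ≤ ·) :=
      hrest.sublist (List.dropWhile_sublist _)
    have ih := scanRuns_sorted (rest.dropWhile (fun y => y == x)) htailpw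
    set same := rest.takeWhile (fun y => y == x) with hsame_def
    set tail := rest.dropWhile (fun y => y == x) with htail_def
    have hsplit : same ++ tail = rest := List.takeWhile_append_dropWhile
    have hsame : ∀ y ∈ same, y = x := by
      intro y hy
      rw [hsame_def] at hy
      exact eq_of_beq (List.mem_takeWhile_imp (p := fun y => y == x) (l := rest) hy)
    have hxtail : x ∉ tail := not_mem_dropWhile_beq x rest hx hrest
    have hcx : (x :: rest).count x = 1 + same.length := by
      rw [← hsplit, ← List.cons_append, List.count_append, List.count_cons_self,
        List.count_eq_length.mpr (fun y hy => (hsame y hy).symm),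
        List.count_eq_zero.mpr hxtail]
      omega
    have hck : ∀ k ∈ tail, (x :: rest).count k = tail.count k := by
      intro k hk
      have hkx : k ≠ x := fun he => hxtail (he ▸ hk)
      have hz : (x :: same).count k = 0 := by
        rw [List.count_eq_zero]
        intro hmem
        rcases List.mem_cons.mp hmem with h1 | h1
        · exact hkx h1
        · exact hkx (hsame k h1)
      rw [← hsplit, ← List.cons_append, List.count_append, hz]
      omega
    have hany : ∀ p : Int → Bool,
        (x :: rest).any p = ((p x || same.any p) || tail.any p) := by
      intro p
      conv_lhs => rw [← hsplit]
      rw [← List.cons_append, List.any_append, List.any_cons]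
    rw [scanRuns, ← hsame_def, ← htail_def, ih,
      hany (fun k => (x :: rest).count k == 1)]
    have htt : tail.any (fun k => tail.count k == 1)
        = tail.any (fun k => (x :: rest).count k == 1) :=
      PySem.List.any_congr_mem (fun k hk => by rw [hck k hk])
    rw [← htt]
    congr 1
    rcases eq_or_ne same [] with hs | hs
    · rw [hcx, hs]
      simp
    · have hlen : same.length ≠ 0 := fun hl => hs (List.length_eq_zero_iff.mp hl)
      have h1 : (same.length == 0) = false := by simp [hlen]
      have h2 : ((x :: rest).count x == 1) = false := by
        rw [hcx]; simp; omega
      have h3 : (same.any fun k => (x :: rest).count k == 1) = false := by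
        rw [List.any_eq_false]
        intro y hy
        rw [hsame y hy, h2]
        simp
      rw [h1, h2, h3]
      simp
termination_by s.length
decreasing_by
  have := List.length_dropWhile_le (p := fun y => y == x) (l := rest)
  simp; omega

-- ===== VERDICT (by name: the statement is the Claim_ definition above) =====
theorem hasUnique_spec : Claim_equal_hasUnique := by
  intro xs _
  show hasUnique xs = hasUnique_alt xs
  rw [hasUnique_eq_any, hasUnique_alt,
    scanRuns_sorted _ (PySem.List.sorted_pairwise xs (fun x => x))]
  have hperm := PySem.List.sorted_perm xs (fun x => x) false
  have hfun : (fun k => (PySem.List.sorted xs (fun x => x) false).count k == 1)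
      = (fun k => xs.count k == 1) := by
    funext k; rw [hperm.count_eq]
  rw [hfun, hperm.any_eq]
  cases hx : xs.any (fun k => xs.count k == 1) with
  | true =>
      rw [List.any_eq_true] at hx ⊢
      obtain ⟨k, hk, hp⟩ := hx
      exact ⟨k, (PySem.Set.mem_ofList _ _).mpr hk, hp⟩
  | false =>
      rw [List.any_eq_false] at hx ⊢
      intro k hk
      exact hx k ((PySem.Set.mem_ofList _ _).mp hk)
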